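-- pv_equiv track=rewrite | github.com/plomgrading/plom | plom/misc_utils.py | next_in_longest_subsequence
-- ===== SOURCE A (Python) =====
-- import string
--
-- def next_in_longest_subsequence(items: list[str]) -> str | None:
--     """Guess next entry in the longest unordered contiguous subsequence.
--
--     Args:
--         items: an unordered list of strings.
--
--     Returns:
--         The next item in a longest subsequence or ``None`` if no
--         subsequences are detected.
--
--     Examples:
--     >>> next_in_longest_subsequence(["(a)", "(b)"])
--     '(c)'
--
--     >>> next_in_longest_subsequence(["i.", "ii.", "iii."])
--     'iv.'
--
--     >>> next_in_longest_subsequence(["2", "1", "C", "(a)", "A", "B"])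
--     'D'
--
--
--     >>> next_in_longest_subsequence(["2", "b", "c", "Z", "foo"])
--
--     >>> next_in_longest_subsequence(["a.", "b)", "(c)"])
--     'b.'
--
--     Notes:
--       * Behaviour in a tie not well-defined; you'll get one of them.
--       * "(a), (b)" and "a., b." are different subsequences.
--       * The sequences should not be longer than the alphabet.  Overly
--         long sequences don't count, e.g., if you already have a-z, then
--         that subsequence cannot be extended:
--
--     >>> from string import ascii_lowercase
--     >>> next_in_longest_subsequence(["Q1", "Q2", *ascii_lowercase])
--     'Q3'
--     """
--     romans = ["i", "ii", "iii", "iv", "v", "vi", "vii", "viii", "ix", "x"]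
--     romans.extend(["x" + n for n in romans] + ["xx" + n for n in romans])
--     smallints = range(1, 31)
--
--     # Each sequence we search is an iterable who iterates are strings
--     # (caution: ascii_lowercase is a string not a list).
--     sequences = [
--         string.ascii_lowercase,
--         [f"{x}." for x in string.ascii_lowercase],
--         [f"{x})" for x in string.ascii_lowercase],
--         [f"({x})" for x in string.ascii_lowercase],
--         string.ascii_uppercase,
--         [f"{x}." for x in string.ascii_uppercase],
--         [f"{x})" for x in string.ascii_uppercase],
--         [f"({x})" for x in string.ascii_uppercase],
--         romans,
--         [f"{x}." for x in romans],
--         [f"{x})" for x in romans],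
--         [f"({x})" for x in romans],
--         [f"Q{x}" for x in smallints],
--         [f"{x}." for x in smallints],
--         [f"{x}" for x in smallints],
--     ]
--
--     counts = [0] * len(sequences)
--     for idx, seq in enumerate(sequences):
--         for count, x in enumerate(seq):
--             if x not in items:
--                 counts[idx] = count
--                 break
--
--     idx, n = max(enumerate(counts), key=lambda t: t[1])
--
--     if n > 0:
--         return sequences[idx][n]
--
--     return None
-- ===== SOURCE B (Python) =====
-- import string
--
--
-- def next_in_longest_subsequence(items):
--     """Guess next entry in the longest unordered contiguous subsequence.
--
--     Re-implementation via an inverted index: one pass over ``items``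
--     records, per candidate sequence, which positions are present, so
--     each label is looked up once instead of scanning every sequence
--     element against ``items``.
--     """
--     romans = ["i", "ii", "iii", "iv", "v", "vi", "vii", "viii", "ix", "x"]
--     romans = romans + ["x" + n for n in romans] + ["xx" + n for n in romans]
--     smallints = range(1, 31)
--     sequences = [
--         list(string.ascii_lowercase),
--         [f"{x}." for x in string.ascii_lowercase],
--         [f"{x})" for x in string.ascii_lowercase],
--         [f"({x})" for x in string.ascii_lowercase],
--         list(string.ascii_uppercase),
--         [f"{x}." for x in string.ascii_uppercase],
--         [f"{x})" for x in string.ascii_uppercase],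
--         [f"({x})" for x in string.ascii_uppercase],
--         romans,
--         [f"{x}." for x in romans],
--         [f"{x})" for x in romans],
--         [f"({x})" for x in romans],
--         [f"Q{x}" for x in smallints],
--         [f"{x}." for x in smallints],
--         [f"{x}" for x in smallints],
--     ]
--
--     # inverted index: label -> every (sequence, position) owning it
--     index = {}
--     for s, seq in enumerate(sequences):
--         for p, x in enumerate(seq):
--             index.setdefault(x, []).append((s, p))
--
--     # one pass over items: per sequence, the set of present positions
--     present = [set() for _ in sequences]
--     for item in items:
--         for s, p in index.get(item, ()):
--             present[s].add(p)
--
--     # prefix length = first absent position (0 when fully present: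
--     # overly long sequences cannot be extended); argmax, earliest wins
--     best_s, best_n = 0, 0
--     for s, seq in enumerate(sequences):
--         n = next((i for i in range(len(seq)) if i not in present[s]), 0)
--         if n > best_n:
--             best_s, best_n = s, n
--
--     return sequences[best_s][best_n] if best_n > 0 else None
-- ===== Notes on version B (the rewrite author's own statement) =====
-- stated objective: alternative
-- what changed: B replaces A's per-sequence membership scans of items by an inverted index (label -> owning (sequence,position) pairs) built once, a single pass over items recording present positions per sequence, prefix lengths read off the position sets, and a fused strict-greater argmax loop.
import Mathlib
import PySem

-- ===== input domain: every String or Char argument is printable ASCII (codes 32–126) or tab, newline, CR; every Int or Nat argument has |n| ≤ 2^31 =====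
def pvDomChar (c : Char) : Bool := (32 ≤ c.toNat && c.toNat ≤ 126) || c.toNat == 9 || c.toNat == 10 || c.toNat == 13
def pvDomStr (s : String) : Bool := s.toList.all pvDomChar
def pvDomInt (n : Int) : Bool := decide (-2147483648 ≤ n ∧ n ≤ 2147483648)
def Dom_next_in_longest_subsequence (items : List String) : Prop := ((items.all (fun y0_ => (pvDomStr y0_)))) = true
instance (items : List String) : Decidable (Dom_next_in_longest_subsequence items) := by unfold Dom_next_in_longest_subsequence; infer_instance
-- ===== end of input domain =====

-- B replaces A's per-sequence membership scans of `items` by an inverted index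
-- (label -> owning (sequence, position) pairs) built once, one pass over `items`
-- recording present positions per sequence, prefix lengths read off those sets,
-- and a fused strict-greater argmax loop (objective: alternative algorithm).

-- ===== PORT A =====
-- shared constant data (both Pythons build the identical `sequences` table)
def pvRomansBase : List String := ["i", "ii", "iii", "iv", "v", "vi", "vii", "viii", "ix", "x"]
def pvRomans : List String := pvRomansBase ++ (pvRomansBase.map (fun n => "x" ++ n) ++ pvRomansBase.map (fun n => "xx" ++ n))
def pvLower : List String := "abcdefghijklmnopqrstuvwxyz".toList.map (fun c => String.ofList [c])
def pvUpper : List String := "ABCDEFGHIJKLMNOPQRSTUVWXYZ".toList.map (fun c => String.ofList [c])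
def pvSmallints : List Int := PySem.List.pyRange 1 31 1
def pvSequences : List (List String) :=
  [ pvLower,
    pvLower.map (fun x => x ++ "."),
    pvLower.map (fun x => x ++ ")"),
    pvLower.map (fun x => "(" ++ x ++ ")"),
    pvUpper,
    pvUpper.map (fun x => x ++ "."),
    pvUpper.map (fun x => x ++ ")"),
    pvUpper.map (fun x => "(" ++ x ++ ")"),
    pvRomans,
    pvRomans.map (fun x => x ++ "."),
    pvRomans.map (fun x => x ++ ")"),
    pvRomans.map (fun x => "(" ++ x ++ ")"),
    pvSmallints.map (fun x => "Q" ++ PySem.Int.toStr x),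
    pvSmallints.map (fun x => PySem.Int.toStr x ++ "."),
    pvSmallints.map (fun x => PySem.Int.toStr x) ]

-- idx, n = max(enumerate(counts), key=lambda t: t[1])  (max keeps the FIRST maximal element)
def pvMaxEnum (l : List (Int × Int)) : Int × Int :=
  match l with
  | [] => ((0 : Int), (0 : Int))   -- unreachable: counts has 15 entries (totality guard only)
  | t0 :: rest => rest.foldl (fun (b t : Int × Int) => if t.2 > b.2 then t else b) t0

-- A's inner loop: 'for count, x in enumerate(seq): if x not in items: counts[idx] = count; break'
-- (counts[idx] stays 0 when the loop never breaks)
def pvCountA (items : List String) : List String → Int → Int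
  | [], _ => 0
  | x :: rest, c => if items.contains x then pvCountA items rest (c + 1) else c

def next_in_longest_subsequence (items : List String) : Option String :=
  let counts := pvSequences.map (fun seq => pvCountA items seq 0)
  let best := pvMaxEnum (PySem.List.enumerate counts)
  if best.2 > 0 then
    (PySem.List.pyGet? pvSequences best.1).bind (fun seq => PySem.List.pyGet? seq best.2)
  else none

-- ===== PORT B =====
-- index = {}; for s, seq in enumerate(sequences): for p, x in enumerate(seq): index.setdefault(x, []).append((s, p))
def pvIndex : PySem.Dict String (List (Int × Int)) :=
  (PySem.List.enumerate pvSequences).foldl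
    (fun d sq => (PySem.List.enumerate sq.2).foldl
      (fun d px => d.modify px.2 [] (fun v => v ++ [(sq.1, px.1)])) d)
    PySem.Dict.empty

-- present = [set() ...]; for item in items: for s, p in index.get(item, ()): present[s].add(p)
def pvPresent (items : List String) : List (PySem.Set Int) :=
  items.foldl
    (fun ps item => (pvIndex.getD item []).foldl
      (fun ps sp => PySem.List.pySetD ps sp.1 (PySem.Set.add (PySem.List.pyGetD ps sp.1 PySem.Set.empty) sp.2)) ps)
    (pvSequences.map (fun _ => PySem.Set.empty))

-- n = next((i for i in range(len(seq)) if i not in present[s]), 0)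
def pvCountB (pres : PySem.Set Int) (seq : List String) : Int :=
  ((PySem.List.pyRange 0 (seq.length : Int) 1).find? (fun i => !(PySem.Set.contains pres i))).getD 0

def next_in_longest_subsequence_alt (items : List String) : Option String :=
  let present := pvPresent items
  let best := (PySem.List.enumerate pvSequences).foldl
    (fun b sq =>
      let n := pvCountB (PySem.List.pyGetD present sq.1 PySem.Set.empty) sq.2
      if n > b.2 then (sq.1, n) else b)
    ((0 : Int), (0 : Int))
  if best.2 > 0 then
    (PySem.List.pyGet? pvSequences best.1).bind (fun seq => PySem.List.pyGet? seq best.2)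
  else none

-- ===== PRECONDITION & SPEC =====
def Spec_next_in_longest_subsequence (items : List String) (out : Option String) : Prop := out = next_in_longest_subsequence_alt items
instance (items : List String) (out : Option String) : Decidable (Spec_next_in_longest_subsequence items out) := by unfold Spec_next_in_longest_subsequence; infer_instance

-- ===== CLAIM (what is proved, stated in full; the proofs are below) =====
def Claim_equal_next_in_longest_subsequence : Prop := ∀ (items : List String), Dom_next_in_longest_subsequence items → Spec_next_in_longest_subsequence items (next_in_longest_subsequence items)

-- ===== LEMMAS AND PROOFS =====

-- the index build, flattened to the canonical grouping-loop shape
def pvAllPairs : List (String × (Int × Int)) :=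
  (PySem.List.enumerate pvSequences).flatMap
    (fun sq => (PySem.List.enumerate sq.2).map (fun px => (px.2, (sq.1, px.1))))

theorem foldl_foldl_flatMap {α β γ : Type} (l : List α) (g : α → List β) (f : γ → β → γ) (init : γ) :
    l.foldl (fun d a => (g a).foldl f d) init = (l.flatMap g).foldl f init := by
  induction l generalizing init with
  | nil => rfl
  | cons a tl ih => simp only [List.flatMap_cons, List.foldl_append, List.foldl_cons, ih]

theorem pvIndex_getD (x : String) :
    pvIndex.getD x [] = (pvAllPairs.filter (fun p => p.1 == x)).map (fun p => p.2) := by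
  have h1 : pvIndex = pvAllPairs.foldl (fun d p => d.modify p.1 [] (fun v => v ++ [p.2])) PySem.Dict.empty := by
    unfold pvIndex pvAllPairs
    rw [← foldl_foldl_flatMap]
    congr 1
    funext d sq
    rw [List.foldl_map]
  rw [h1, PySem.Dict.getD_foldl_modify_append]
  simp

theorem mem_pvIndex_getD (s p : Int) (x : String) :
    (s, p) ∈ pvIndex.getD x [] ↔
      ∃ (k : Nat) (hk : k < pvSequences.length) (j : Nat) (hj : j < (pvSequences[k]).length),
        s = (k : Int) ∧ p = (j : Int) ∧ (pvSequences[k])[j] = x := by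
  rw [pvIndex_getD]
  simp only [pvAllPairs, List.mem_map, List.mem_filter, List.mem_flatMap,
    PySem.List.mem_enumerate_iff, beq_iff_eq]
  constructor
  · rintro ⟨pair, ⟨⟨sq, ⟨k, hk, rfl⟩, hpair⟩, hx⟩, hsp⟩
    simp only at hpair
    obtain ⟨px, ⟨j, hj, rfl⟩, rfl⟩ := hpair
    have hs2 : s = (k : Int) := by have := congrArg Prod.fst hsp; simp at this; omega
    have hp2 : p = (j : Int) := by have := congrArg Prod.snd hsp; simp at this; omega
    exact ⟨k, hk, j, hj, hs2, hp2, hx⟩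
  · rintro ⟨k, hk, j, hj, rfl, rfl, rfl⟩
    refine ⟨((pvSequences[k])[j], ((k : Int), (j : Int))), ⟨⟨((k : Int), pvSequences[k]), ⟨k, hk, by simp⟩, ?_⟩, rfl⟩, rfl⟩
    simp only [List.mem_map, PySem.List.mem_enumerate_iff]
    exact ⟨((j : Int), (pvSequences[k])[j]), ⟨j, hj, by simp⟩, by simp⟩

-- one update step of the present-sets loop
theorem pres_inner (l : List (Int × Int)) (ps : List (PySem.Set Int)) (s p : Int)
    (hs : 0 ≤ s) (hslt : s < (ps.length : Int))
    (hl : ∀ q ∈ l, 0 ≤ q.1 ∧ q.1 < (ps.length : Int)) :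
    p ∈ PySem.List.pyGetD
        (l.foldl (fun ps sp => PySem.List.pySetD ps sp.1 (PySem.Set.add (PySem.List.pyGetD ps sp.1 PySem.Set.empty) sp.2)) ps)
        s PySem.Set.empty ↔
      p ∈ PySem.List.pyGetD ps s PySem.Set.empty ∨ (s, p) ∈ l := by
  induction l generalizing ps with
  | nil => simp
  | cons q tl ih =>
    obtain ⟨hq0, hq1⟩ := hl q (by simp)
    have hlen : (PySem.List.pySetD ps q.1 (PySem.Set.add (PySem.List.pyGetD ps q.1 PySem.Set.empty) q.2)).length = ps.length := by
      simp [PySem.List.length_pySetD]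
    simp only [List.foldl_cons]
    rw [ih _ (by rw [hlen]; exact hslt) (fun r hr => by rw [hlen]; exact hl r (by simp [hr]))]
    have hget : PySem.List.pyGetD
        (PySem.List.pySetD ps q.1 (PySem.Set.add (PySem.List.pyGetD ps q.1 PySem.Set.empty) q.2)) s PySem.Set.empty
        = if s = q.1 then PySem.Set.add (PySem.List.pyGetD ps q.1 PySem.Set.empty) q.2
          else PySem.List.pyGetD ps s PySem.Set.empty := by
      have hqlt : q.1.toNat < ps.length := by omega
      rw [PySem.List.pySetD_of_nonneg _ _ hq0,
          PySem.List.pyGetD_of_nonneg _ _ hs,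
          PySem.List.pyGetD_of_nonneg _ _ hs]
      simp only [List.getD_eq_getElem?_getD, List.getElem?_set]
      by_cases hsq : s = q.1
      · have h1 : q.1.toNat = s.toNat := by omega
        rw [if_pos hsq, if_pos h1, if_pos hqlt]
        rfl
      · have h1 : q.1.toNat ≠ s.toNat := by omega
        rw [if_neg hsq, if_neg h1]
    rw [hget]
    by_cases hsq : s = q.1
    · rw [if_pos hsq, PySem.Set.mem_add]
      have hpq : ((s, p) = q) ↔ p = q.2 := by
        constructor
        · intro h; exact congrArg Prod.snd h
        · intro h; rw [hsq, h]
      rw [List.mem_cons, hpq, hsq]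
      tauto
    · rw [if_neg hsq]
      have hpq : ¬ ((s, p) = q) := fun h => hsq (congrArg Prod.fst h)
      rw [List.mem_cons]
      tauto

theorem pres_inner_len (l : List (Int × Int)) (ps : List (PySem.Set Int)) :
    (l.foldl (fun ps sp => PySem.List.pySetD ps sp.1 (PySem.Set.add (PySem.List.pyGetD ps sp.1 PySem.Set.empty) sp.2)) ps).length = ps.length := by
  induction l generalizing ps with
  | nil => rfl
  | cons q tl ih => simp only [List.foldl_cons]; rw [ih]; simp [PySem.List.length_pySetD]

theorem pres_outer (its : List String) (ps : List (PySem.Set Int)) (s p : Int)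
    (hs : 0 ≤ s) (hslt : s < (ps.length : Int)) (hlen : ps.length = 15) :
    p ∈ PySem.List.pyGetD
        (its.foldl (fun ps item => (pvIndex.getD item []).foldl
          (fun ps sp => PySem.List.pySetD ps sp.1 (PySem.Set.add (PySem.List.pyGetD ps sp.1 PySem.Set.empty) sp.2)) ps) ps)
        s PySem.Set.empty ↔
      p ∈ PySem.List.pyGetD ps s PySem.Set.empty ∨ ∃ x ∈ its, (s, p) ∈ pvIndex.getD x [] := by
  induction its generalizing ps with
  | nil => simp
  | cons item tl ih =>
    have hl : ∀ q ∈ pvIndex.getD item [], 0 ≤ q.1 ∧ q.1 < (ps.length : Int) := by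
      intro q hq
      obtain ⟨k, hk, j, hj, hs1, _, _⟩ := (mem_pvIndex_getD q.1 q.2 item).1 (by cases q; exact hq)
      have : pvSequences.length = 15 := rfl
      omega
    simp only [List.foldl_cons]
    rw [ih _ (by rw [pres_inner_len]; exact hslt) (by rw [pres_inner_len]; exact hlen),
        pres_inner _ _ _ _ hs hslt hl]
    simp only [List.mem_cons]
    constructor
    · rintro ((h | h) | ⟨x, hx, hmem⟩)
      · exact Or.inl h
      · exact Or.inr ⟨item, Or.inl rfl, h⟩
      · exact Or.inr ⟨x, Or.inr hx, hmem⟩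
    · rintro (h | ⟨x, (rfl | hx), hmem⟩)
      · exact Or.inl (Or.inl h)
      · exact Or.inl (Or.inr hmem)
      · exact Or.inr ⟨x, hx, hmem⟩

theorem pvPresent_mem (items : List String) (s p : Int) (hs : 0 ≤ s) (hslt : s < 15) :
    p ∈ PySem.List.pyGetD (pvPresent items) s PySem.Set.empty ↔
      ∃ x ∈ items, (s, p) ∈ pvIndex.getD x [] := by
  unfold pvPresent
  rw [pres_outer items _ s p hs (by simpa using hslt) (by rfl)]
  have hinit : PySem.List.pyGetD (pvSequences.map (fun _ => (PySem.Set.empty : PySem.Set Int))) s PySem.Set.empty = PySem.Set.empty := by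
    rw [PySem.List.pyGetD_of_nonneg _ _ hs]
    rcases Nat.lt_or_ge s.toNat (pvSequences.map (fun _ => (PySem.Set.empty : PySem.Set Int))).length with h | h
    · simp [List.getD_eq_getElem?_getD]
    · simp [List.getD_eq_getElem?_getD]
  rw [hinit]
  simp [PySem.Set.empty]

-- A's break-loop as a findIdx?
theorem pvCountA_eq (items : List String) (seq : List String) (c : Int) :
    pvCountA items seq c =
      match seq.findIdx? (fun x => !(items.contains x)) with
      | some i => c + (i : Int)
      | none => 0 := by
  induction seq generalizing c with
  | nil => simp [pvCountA]
  | cons a tl ih =>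
    rw [List.findIdx?_cons]
    by_cases h : items.contains a
    · have hb : (!(items.contains a)) = false := by rw [h]; rfl
      rw [hb, if_neg (by simp)]
      have hA : pvCountA items (a :: tl) c = pvCountA items tl (c + 1) := by
        rw [show pvCountA items (a :: tl) c = if items.contains a then pvCountA items tl (c + 1) else c from rfl, if_pos h]
      rw [hA, ih]
      cases htl : tl.findIdx? (fun x => !(items.contains x)) with
      | none => rfl
      | some i => show c + 1 + (i : Int) = c + ((i : Nat) + 1 : Nat) ; push_cast; ring
    · have hb : (!(items.contains a)) = true := by rw [Bool.not_eq_true'] at *; simpa using h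
      rw [hb, if_pos rfl]
      have hA : pvCountA items (a :: tl) c = c := by
        rw [show pvCountA items (a :: tl) c = if items.contains a then pvCountA items tl (c + 1) else c from rfl, if_neg h]
      rw [hA]
      simp

theorem pvCountA_nonneg (items : List String) (seq : List String) (c : Int) (hc : 0 ≤ c) :
    0 ≤ pvCountA items seq c := by
  rw [pvCountA_eq]
  cases h : seq.findIdx? (fun x => !(items.contains x)) with
  | none => rfl
  | some i => show (0 : Int) ≤ c + (i : Int) ; positivity

theorem find?_range_eq_findIdx? {α : Type} (seq : List α) (P : Nat → Bool) (Q : α → Bool)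
    (h : ∀ (i : Nat) (hi : i < seq.length), P i = Q seq[i]) :
    (List.range seq.length).find? P = seq.findIdx? Q := by
  induction seq generalizing P Q with
  | nil => simp
  | cons a tl ih =>
    rw [List.length_cons, List.range_succ_eq_map, List.find?_cons, List.findIdx?_cons]
    have h0 : P 0 = Q a := h 0 (by simp)
    cases hq : Q a with
    | true => rw [h0, hq]; rfl
    | false =>
      rw [h0, hq]
      show List.find? P (List.map Nat.succ (List.range tl.length))
          = Option.map (fun i => i + 1) (List.findIdx? Q tl)
      rw [List.find?_map,
        ih (P ∘ Nat.succ) Q (fun i hi => by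
          simp only [Function.comp]
          simpa using h (i + 1) (by simpa using hi))]

theorem bool_eq_of_iff {b c : Bool} (h : b = true ↔ c = true) : b = c := by
  cases b <;> cases c <;> simp_all

-- the counts agree sequence by sequence
theorem counts_agree (items : List String) (k : Nat) (hk : k < pvSequences.length) :
    pvCountB (PySem.List.pyGetD (pvPresent items) (k : Int) PySem.Set.empty) (pvSequences[k]) =
      pvCountA items (pvSequences[k]) 0 := by
  have hlen : pvSequences.length = 15 := rfl
  have H : ∀ (i : Nat) (hi : i < (pvSequences[k]).length),
      ((i : Int) ∈ PySem.List.pyGetD (pvPresent items) (k : Int) PySem.Set.empty) ↔ (pvSequences[k])[i] ∈ items := by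
    intro i hi
    rw [pvPresent_mem items (k : Int) (i : Int) (Int.natCast_nonneg k) (by exact_mod_cast hlen ▸ hk)]
    constructor
    · rintro ⟨x, hx, hmem⟩
      obtain ⟨k', hk', j', hj', hs, hp, hlab⟩ := (mem_pvIndex_getD _ _ x).1 hmem
      have hkk : k' = k := by exact_mod_cast hs.symm
      subst hkk
      have hjj : j' = i := by exact_mod_cast hp.symm
      subst hjj
      exact hlab ▸ hx
    · intro hmem
      exact ⟨(pvSequences[k])[i], hmem, (mem_pvIndex_getD _ _ _).2 ⟨k, hk, i, hi, rfl, rfl, rfl⟩⟩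
  unfold pvCountB
  rw [pvCountA_eq]
  have hr : PySem.List.pyRange 0 ((pvSequences[k]).length : Int) 1
      = (List.range (pvSequences[k]).length).map (fun j => ((j : Nat) : Int)) := by
    rw [PySem.List.pyRange_one]
    simp
  rw [hr, List.find?_map]
  rw [find?_range_eq_findIdx? (pvSequences[k])
      ((fun i => !(PySem.Set.contains (PySem.List.pyGetD (pvPresent items) (k : Int) PySem.Set.empty) i)) ∘ (fun j => ((j : Nat) : Int)))
      (fun x => !(items.contains x))
      (fun i hi => by
        simp only [Function.comp]
        refine congrArg (fun b => !b) (bool_eq_of_iff ?_)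
        rw [PySem.Set.contains_iff, List.contains_iff_mem]
        exact H i hi)]
  cases hfi : (pvSequences[k]).findIdx? (fun x => !(items.contains x)) with
  | none => rfl
  | some i => simp

-- enumerate of a mapped list
theorem enumerate_map {α β : Type} (f : α → β) (l : List α) (s : Int) :
    PySem.List.enumerate (l.map f) s = (PySem.List.enumerate l s).map (fun q => (q.1, f q.2)) := by
  induction l generalizing s with
  | nil => rfl
  | cons a tl ih => simp [PySem.List.enumerate_cons, ih]

-- B's argmax fold from (0,0) equals A's max(enumerate(...)) when the head is (0, c) with 0 ≤ c
theorem fold_first (t0 : Int × Int) (rest : List (Int × Int)) (h1 : t0.1 = 0) (h2 : 0 ≤ t0.2) :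
    (t0 :: rest).foldl (fun (b t : Int × Int) => if t.2 > b.2 then t else b) ((0 : Int), (0 : Int))
      = pvMaxEnum (t0 :: rest) := by
  unfold pvMaxEnum
  simp only [List.foldl_cons]
  congr 1
  by_cases h : t0.2 > 0
  · rw [if_pos h]
  · rw [if_neg h]
    have : t0.2 = 0 := by omega
    cases t0
    simp_all

-- ===== VERDICT (by name: the statement is the Claim_ definition above) =====
theorem next_in_longest_subsequence_spec : Claim_equal_next_in_longest_subsequence := by
  intro items _
  unfold Spec_next_in_longest_subsequence
  have hbest :
      (PySem.List.enumerate pvSequences).foldl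
        (fun b sq =>
          let n := pvCountB (PySem.List.pyGetD (pvPresent items) sq.1 PySem.Set.empty) sq.2
          if n > b.2 then (sq.1, n) else b)
        ((0 : Int), (0 : Int))
      = pvMaxEnum (PySem.List.enumerate (pvSequences.map (fun seq => pvCountA items seq 0))) := by
    have h1 := PySem.List.foldl_congr_mem (PySem.List.enumerate pvSequences)
      (fun (b : Int × Int) (sq : Int × List String) =>
        let n := pvCountB (PySem.List.pyGetD (pvPresent items) sq.1 PySem.Set.empty) sq.2
        if n > b.2 then (sq.1, n) else b)
      (fun (b : Int × Int) (sq : Int × List String) =>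
        if pvCountA items sq.2 0 > b.2 then (sq.1, pvCountA items sq.2 0) else b)
      ((0 : Int), (0 : Int))
      (by
        intro acc sq hsq
        obtain ⟨k, hk, rfl⟩ := (PySem.List.mem_enumerate_iff _ _ _).1 hsq
        show (let n := pvCountB (PySem.List.pyGetD (pvPresent items) ((0 : Int) + (k : Int)) PySem.Set.empty) (pvSequences[k])
              if n > acc.2 then ((0 : Int) + (k : Int), n) else acc) = _
        rw [show (0 : Int) + (k : Int) = (k : Int) by ring]
        show (if pvCountB (PySem.List.pyGetD (pvPresent items) (k : Int) PySem.Set.empty) (pvSequences[k]) > acc.2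
              then ((k : Int), pvCountB (PySem.List.pyGetD (pvPresent items) (k : Int) PySem.Set.empty) (pvSequences[k])) else acc) = _
        rw [counts_agree items k hk])
    rw [h1]
    have h2 : (PySem.List.enumerate pvSequences).foldl
        (fun (b : Int × Int) (sq : Int × List String) =>
          if pvCountA items sq.2 0 > b.2 then (sq.1, pvCountA items sq.2 0) else b)
        ((0 : Int), (0 : Int))
      = ((PySem.List.enumerate pvSequences).map (fun (sq : Int × List String) => (sq.1, pvCountA items sq.2 0))).foldl
          (fun (b t : Int × Int) => if t.2 > b.2 then t else b) ((0 : Int), (0 : Int)) := by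
      rw [List.foldl_map]
    rw [h2]
    have h3 : PySem.List.enumerate (pvSequences.map (fun seq => pvCountA items seq 0)) 0
        = (PySem.List.enumerate pvSequences 0).map (fun (sq : Int × List String) => (sq.1, pvCountA items sq.2 0)) := by
      rw [enumerate_map]
    rw [← h3]
    cases hseq : pvSequences.map (fun seq => pvCountA items seq 0) with
    | nil => exact absurd (congrArg List.length hseq) (by simp [pvSequences])
    | cons c0 cs =>
      rw [PySem.List.enumerate_cons]
      refine fold_first _ _ rfl ?_
      have hc : c0 ∈ pvSequences.map (fun seq => pvCountA items seq 0) := by rw [hseq]; simp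
      obtain ⟨seq, _, rfl⟩ := List.mem_map.1 hc
      exact pvCountA_nonneg items seq 0 le_rfl
  simp only [next_in_longest_subsequence, next_in_longest_subsequence_alt]
  rw [hbest]
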